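-- pv_equiv track=rewrite | github.com/naiannegri/python-studies | CodeSignal/statues.py | solution
-- ===== SOURCE A (Python) =====
-- def solution(statues):
--     statues.sort()
--     sizeList=len(statues)
--     count=0
--     for number in statues:
--         if count < len(statues)-1:
--             if statues[count]+1 < statues[count+1]:
--                 statues.insert(count+1,statues[count]+1)
--             else:
--                 pass
--             count += 1
--         else:
--             break
--
--     result = sizeList - len(statues)
--     if result < 0:
--         result=-result
--
--     return result
-- ===== SOURCE B (Python) =====
-- def solution(statues):
--     if not statues:
--         return 0
--     s = set(statues)
--     return max(s) - min(s) + 1 - len(s)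
-- ===== Notes on version B (the rewrite author's own statement) =====
-- stated objective: faster
-- what changed: Replaced sort plus an element-by-element gap-filling loop that repeatedly inserts into the list with a closed form: dedupe into a set and return max-min+1-len(set), guarding the empty list.
import Mathlib
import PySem

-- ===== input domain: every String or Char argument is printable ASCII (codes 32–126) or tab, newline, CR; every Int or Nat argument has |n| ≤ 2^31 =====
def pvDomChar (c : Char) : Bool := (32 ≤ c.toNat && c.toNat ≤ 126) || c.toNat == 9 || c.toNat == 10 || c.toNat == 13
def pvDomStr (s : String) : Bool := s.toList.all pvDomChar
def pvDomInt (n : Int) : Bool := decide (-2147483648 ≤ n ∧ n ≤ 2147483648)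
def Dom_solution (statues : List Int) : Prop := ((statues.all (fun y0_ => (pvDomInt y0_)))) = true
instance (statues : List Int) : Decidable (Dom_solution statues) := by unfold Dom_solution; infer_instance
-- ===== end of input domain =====

-- B replaces A's sort + element-by-element gap-filling insertion loop by the closed form
-- max(set)-min(set)+1-len(set) (0 for the empty list); equivalence is about the RETURN value
-- only (Python A sorts and inserts into its argument in place; B does not mutate it).


-- ===== PORT A =====
-- Python's `for number in statues` over the mutating list, with the iterator position `i`
-- and Python's `count`; `fuel` is only a termination device — the proof below shows the
-- bound passed by `solution` is never exhausted.
def solLoop : Nat → Nat → Nat → List Int → List Int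
  | 0, _, _, lst => lst
  | f+1, i, count, lst =>
    if i < lst.length then
      if (count : Int) < (lst.length : Int) - 1 then
        if PySem.List.pyGetD lst (count : Int) 0 + 1 < PySem.List.pyGetD lst ((count : Int) + 1) 0 then
          solLoop f (i+1) (count+1)
            (PySem.List.insert lst ((count : Int) + 1) (PySem.List.pyGetD lst (count : Int) 0 + 1))
        else
          solLoop f (i+1) (count+1) lst
      else lst
    else lst

def solution (statues : List Int) : Int :=
  let s := PySem.List.sorted statues (fun x => x) false
  let sizeList : Int := s.length
  let final := solLoop (s.length + (s.getLastD 0 - s.headD 0).toNat + 1) 0 0 s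
  let result : Int := sizeList - final.length
  if result < 0 then -result else result

-- ===== PORT B =====
def solution_alt (statues : List Int) : Int :=
  if statues = [] then 0
  else
    let s := PySem.Set.ofList statues
    (PySem.List.max? s (fun x => x)).getD 0 - (PySem.List.min? s (fun x => x)).getD 0 + 1 - s.length

-- ===== PRECONDITION & SPEC =====
def Spec_solution (statues : List Int) (out : Int) : Prop := out = solution_alt statues
instance (statues : List Int) (out : Int) : Decidable (Spec_solution statues out) := by unfold Spec_solution; infer_instance

-- ===== CLAIM (what is proved, stated in full; the proofs are below) =====
def Claim_equal_solution : Prop := ∀ (statues : List Int), Dom_solution statues → Spec_solution statues (solution statues)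

-- ===== LEMMAS AND PROOFS =====

-- What A's loop does to the tail of the sorted list: fill every gap with consecutive values.
def fill : Int → List Int → List Int
  | x, [] => [x]
  | x, y :: r => if x + 1 < y then x :: fill (x+1) (y :: r) else x :: fill y r
termination_by x l => (l.length, ((l.headD x) - x).toNat)
decreasing_by
  · simp; omega
  · simp [Prod.lex_iff]

-- number of adjacent non-increases (duplicates, once sorted) seen along x :: l
def dups : Int → List Int → Int
  | _, [] => 0
  | x, y :: r => (if y ≤ x then 1 else 0) + dups y r

theorem chain_le_mem {x : Int} {l : List Int} (h : List.IsChain (· ≤ ·) (x :: l)) :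
    ∀ z ∈ l, x ≤ z := by
  induction l generalizing x with
  | nil => simp
  | cons y r ih =>
    rw [List.isChain_cons_cons] at h
    intro z hz
    rcases List.mem_cons.mp hz with rfl | hz
    · exact h.1
    · exact le_trans h.1 (ih h.2 z hz)

theorem chain_le_getLastD {y : Int} {r : List Int} (h : List.IsChain (· ≤ ·) (y :: r)) :
    y ≤ r.getLastD y := by
  induction r generalizing y with
  | nil => simp
  | cons a s ih =>
    rw [List.isChain_cons_cons] at h
    rw [List.getLastD_cons]
    exact le_trans h.1 (ih h.2)

theorem chain_mem_le_getLastD {x : Int} {t : List Int} (h : List.IsChain (· ≤ ·) (x :: t)) :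
    ∀ z ∈ x :: t, z ≤ t.getLastD x := by
  induction t generalizing x with
  | nil => simp
  | cons y r ih =>
    rw [List.isChain_cons_cons] at h
    intro z hz
    rw [List.getLastD_cons]
    rcases List.mem_cons.mp hz with rfl | hz
    · exact le_trans h.1 (chain_le_getLastD h.2)
    · exact ih h.2 z hz

theorem getLastD_mem (x : Int) (t : List Int) : t.getLastD x ∈ x :: t := by
  induction t generalizing x with
  | nil => simp
  | cons y r ih =>
    rw [List.getLastD_cons]
    exact List.mem_cons_of_mem x (ih y)

theorem getD_append_len (pre : List Int) (z : Int) (l : List Int) :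
    (pre ++ z :: l).getD pre.length 0 = z := by
  simp [List.getD]

theorem getD_append_len_succ (pre : List Int) (z y : Int) (l : List Int) :
    (pre ++ z :: y :: l).getD (pre.length + 1) 0 = y := by
  simp [List.getD]

theorem take_append_len_succ (pre : List Int) (z : Int) (l : List Int) :
    (pre ++ z :: l).take (pre.length + 1) = pre ++ [z] := by
  induction pre with
  | nil => simp
  | cons a p ih => simp [ih]

theorem drop_append_len_succ (pre : List Int) (z : Int) (l : List Int) :
    (pre ++ z :: l).drop (pre.length + 1) = l := by
  induction pre with
  | nil => simp
  | cons a p ih => simp [ih]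

theorem solLoop_eq : ∀ (f : Nat) (x : Int) (rest pre : List Int),
    List.IsChain (· ≤ ·) (x :: rest) →
    rest.length + (rest.getLastD x - x).toNat + 1 ≤ f →
    solLoop f pre.length pre.length (pre ++ x :: rest) = pre ++ fill x rest := by
  intro f
  induction f with
  | zero => intro x rest pre _ hf; omega
  | succ f ih =>
    intro x rest pre hchain hf
    rw [solLoop]
    rw [if_pos (by simp : pre.length < (pre ++ x :: rest).length)]
    cases rest with
    | nil =>
      rw [if_neg (by simp), fill]
    | cons y r =>
      rw [List.isChain_cons_cons] at hchain
      rw [if_pos (by push_cast [List.length_append, List.length_cons]; omega)]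
      rw [PySem.List.pyGetD_natCast, getD_append_len]
      have hcast : ((pre.length : Int) + 1) = (((pre.length + 1 : Nat)) : Int) := by push_cast; ring
      rw [hcast, PySem.List.pyGetD_natCast, getD_append_len_succ]
      have hL : y ≤ r.getLastD y := chain_le_getLastD hchain.2
      rw [List.getLastD_cons] at hf
      by_cases hgap : x + 1 < y
      · rw [if_pos hgap]
        rw [PySem.List.insert_natCast _ _ _ (by simp)]
        rw [take_append_len_succ, drop_append_len_succ]
        have hrw : pre ++ [x] ++ (x + 1) :: y :: r = (pre ++ [x]) ++ (x+1) :: (y :: r) := by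
          simp
        rw [hrw]
        have hlen : pre.length + 1 = (pre ++ [x]).length := by simp
        rw [hlen]
        rw [ih (x+1) (y::r) (pre ++ [x])
              (List.isChain_cons_cons.mpr ⟨by omega, hchain.2⟩)
              (by rw [List.getLastD_cons]; simp only [List.length_cons] at hf ⊢; omega)]
        rw [show fill x (y :: r) = x :: fill (x+1) (y :: r) from by rw [fill, if_pos hgap]]
        simp
      · rw [if_neg hgap]
        have hrw : pre ++ x :: y :: r = (pre ++ [x]) ++ y :: r := by simp
        rw [hrw]
        have hlen : pre.length + 1 = (pre ++ [x]).length := by simp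
        rw [hlen]
        rw [ih y r (pre ++ [x]) hchain.2 (by simp only [List.length_cons] at hf ⊢; omega)]
        rw [show fill x (y :: r) = x :: fill y r from by rw [fill, if_neg hgap]]
        simp

theorem fill_length : ∀ (x : Int) (l : List Int), List.IsChain (· ≤ ·) (x :: l) →
    ((fill x l).length : Int) = (l.getLastD x - x) + 1 + dups x l := by
  intro x l
  induction x, l using fill.induct with
  | case1 x =>
    intro _; simp [fill, dups]
  | case2 x y r hgap ih =>
    intro h
    rw [List.isChain_cons_cons] at h
    have hih := ih (List.isChain_cons_cons.mpr ⟨by omega, h.2⟩)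
    rw [fill, if_pos hgap]
    rw [List.getLastD_cons] at hih ⊢
    simp only [List.length_cons, dups] at hih ⊢
    push_cast at hih ⊢
    rw [if_neg (show ¬ (y ≤ x + 1) from by omega)] at hih
    rw [if_neg (show ¬ (y ≤ x) from by omega)]
    omega
  | case3 x y r hgap ih =>
    intro h
    rw [List.isChain_cons_cons] at h
    have hih := ih h.2
    rw [fill, if_neg hgap]
    rw [List.getLastD_cons]
    simp only [List.length_cons, dups] at hih ⊢
    have hyL : y ≤ r.getLastD y := chain_le_getLastD h.2
    push_cast at hih ⊢
    by_cases hyx : y ≤ x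
    · rw [if_pos hyx]; omega
    · rw [if_neg hyx]; omega

theorem length_le_fill_length : ∀ (x : Int) (l : List Int),
    (x :: l).length ≤ (fill x l).length := by
  intro x l
  induction x, l using fill.induct with
  | case1 x => simp [fill]
  | case2 x y r hgap ih =>
    rw [fill, if_pos hgap]
    simp only [List.length_cons] at ih ⊢
    omega
  | case3 x y r hgap ih =>
    rw [fill, if_neg hgap]
    simp only [List.length_cons] at ih ⊢
    omega

theorem card_sorted_chain : ∀ (l : List Int) (x : Int), List.IsChain (· ≤ ·) (x :: l) →
    (((x :: l).toFinset.card : Int)) = 1 + l.length - dups x l := by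
  intro l
  induction l with
  | nil => intro x _; simp [dups]
  | cons y r ih =>
    intro x h
    rw [List.isChain_cons_cons] at h
    have hih := ih y h.2
    by_cases hyx : y ≤ x
    · have hxy : x = y := le_antisymm h.1 hyx
      subst hxy
      have hmem : x ∈ (x :: r).toFinset := by simp
      rw [show (x :: x :: r).toFinset = insert x (x :: r).toFinset from by simp]
      rw [Finset.insert_eq_self.mpr hmem]
      simp only [dups, if_pos hyx, List.length_cons] at hih ⊢
      push_cast at hih ⊢
      omega
    · have hxlt : x < y := by omega
      have hnot : x ∉ (y :: r).toFinset := by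
        simp only [List.mem_toFinset]
        intro hmem
        rcases List.mem_cons.mp hmem with rfl | hmem
        · omega
        · have := chain_le_mem h.2 x hmem; omega
      rw [show (x :: y :: r).toFinset = insert x (y :: r).toFinset from by simp]
      rw [Finset.card_insert_of_notMem hnot]
      simp only [dups, if_neg hyx, List.length_cons] at hih ⊢
      push_cast at hih ⊢
      omega

-- ===== VERDICT (by name: the statement is the Claim_ definition above) =====
theorem solution_spec : Claim_equal_solution := by
  unfold Claim_equal_solution
  intro statues _
  unfold Spec_solution
  by_cases hnil : statues = []
  · subst hnil; decide
  · obtain ⟨x, t, hxt⟩ : ∃ x t, PySem.List.sorted statues (fun x => x) false = x :: t := by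
      cases hs : PySem.List.sorted statues (fun x => x) false with
      | nil => exact absurd ((PySem.List.sorted_eq_nil_iff _ _ _).mp hs) hnil
      | cons a b => exact ⟨a, b, rfl⟩
    have hperm : (x :: t).Perm statues := hxt ▸ PySem.List.sorted_perm statues (fun x => x) false
    have hchain : List.IsChain (· ≤ ·) (x :: t) := by
      rw [List.isChain_iff_pairwise]
      have := PySem.List.sorted_pairwise statues (fun x => x)
      rw [hxt] at this
      exact this
    set L : Int := t.getLastD x with hL
    -- value of port A
    have hloop : solLoop ((x :: t).length + ((x :: t).getLastD 0 - (x :: t).headD 0).toNat + 1) 0 0 (x :: t)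
        = fill x t := by
      have := solLoop_eq ((x :: t).length + ((x :: t).getLastD 0 - (x :: t).headD 0).toNat + 1)
        x t [] hchain
        (by rw [List.getLastD_cons]; simp only [List.headD_cons, List.length_cons]; omega)
      simpa using this
    have hfilllen : ((fill x t).length : Int) = (L - x) + 1 + dups x t := fill_length x t hchain
    have hA : solution statues = ((fill x t).length : Int) - ((x :: t).length : Int) := by
      unfold solution
      rw [hxt]
      simp only [hloop]
      have hle := length_le_fill_length x t
      split_ifs with hlt
      · omega
      · omega
    -- value of port B
    set so := PySem.Set.ofList statues with hso
    have hsomem : ∀ z, z ∈ so ↔ z ∈ x :: t := by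
      intro z
      rw [hso, PySem.Set.mem_ofList, hperm.mem_iff]
    have hsoFin : so.toFinset = (x :: t).toFinset := by
      ext z; simp [List.mem_toFinset, hsomem z]
    have hsolen : ((so.length : Int)) = 1 + t.length - dups x t := by
      have hnd : so.Nodup := PySem.Set.nodup_ofList statues
      have := List.toFinset_card_of_nodup hnd
      rw [hsoFin] at this
      have hcard := card_sorted_chain t x hchain
      omega
    have hxso : x ∈ so := (hsomem x).mpr (by simp)
    have hLso : L ∈ so := (hsomem L).mpr (getLastD_mem x t)
    have hmax : (PySem.List.max? so (fun x => x)).getD 0 = L := by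
      cases hm : PySem.List.max? so (fun x => x) with
      | none =>
        exact absurd ((PySem.List.max?_eq_none_iff _ _).mp hm) (by intro hc; rw [hc] at hxso; simp at hxso)
      | some m =>
        have hm1 : m ≤ L := chain_mem_le_getLastD hchain m ((hsomem m).mp (PySem.List.max?_mem hm))
        have hm2 : L ≤ m := PySem.List.max?_isMax hm L hLso
        simp [le_antisymm hm1 hm2]
    have hmin : (PySem.List.min? so (fun x => x)).getD 0 = x := by
      cases hm : PySem.List.min? so (fun x => x) with
      | none =>
        exact absurd ((PySem.List.min?_eq_none_iff _ _).mp hm) (by intro hc; rw [hc] at hxso; simp at hxso)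
      | some m =>
        have hmem := (hsomem m).mp (PySem.List.min?_mem hm)
        have hm1 : x ≤ m := by
          rcases List.mem_cons.mp hmem with rfl | hmem
          · exact le_refl m
          · exact chain_le_mem hchain m hmem
        have hm2 : m ≤ x := PySem.List.min?_isMin hm x hxso
        simp [le_antisymm hm2 hm1]
    have hB : solution_alt statues = L - x + 1 - so.length := by
      unfold solution_alt
      rw [if_neg hnil, ← hso]
      simp only []
      rw [hmax, hmin]
    rw [hA, hB, hfilllen]
    simp only [List.length_cons]
    push_cast
    omega
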